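-- pv_equiv track=rewrite | github.com/CheesyGamer77/DungeonWhisperer | cogs/components.py | __remove_all_dict_keys_except
-- ===== SOURCE A (Python) =====
-- from typing import Any, Callable, Generator, List, Optional, Union
--
-- def __remove_all_dict_keys_except(d: dict, key: Any) -> dict:
--     # no, you cannot just iterate over each dict key and delete it on the fly
--     # python gets very angry at you and raises a RuntimeError if you try to do that
--
--     data = d
--     to_remove = []
--     for k in data.keys():
--         if k != key:
--             to_remove.append(k)
--
--     # now we can actually delete the keys
--     for k in to_remove:
--         del data[k]
--
--     return data
-- ===== SOURCE B (Python) =====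
-- def __remove_all_dict_keys_except(d: dict, key):
--     # Save the kept entry (found by == scan over items), clear the dict, reinsert.
--     kept = None
--     for k, v in d.items():
--         if k == key:
--             kept = v
--             break
--     d.clear()
--     if kept is not None:
--         d[key] = kept
--     return d
-- ===== Notes on version B (the rewrite author's own statement) =====
-- stated objective: simpler
-- what changed: Instead of collecting all non-kept keys into a list and deleting them one by one, B scans once for the kept key's value, clears the dict, and reinserts that single entry if it was present.
import Mathlib
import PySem

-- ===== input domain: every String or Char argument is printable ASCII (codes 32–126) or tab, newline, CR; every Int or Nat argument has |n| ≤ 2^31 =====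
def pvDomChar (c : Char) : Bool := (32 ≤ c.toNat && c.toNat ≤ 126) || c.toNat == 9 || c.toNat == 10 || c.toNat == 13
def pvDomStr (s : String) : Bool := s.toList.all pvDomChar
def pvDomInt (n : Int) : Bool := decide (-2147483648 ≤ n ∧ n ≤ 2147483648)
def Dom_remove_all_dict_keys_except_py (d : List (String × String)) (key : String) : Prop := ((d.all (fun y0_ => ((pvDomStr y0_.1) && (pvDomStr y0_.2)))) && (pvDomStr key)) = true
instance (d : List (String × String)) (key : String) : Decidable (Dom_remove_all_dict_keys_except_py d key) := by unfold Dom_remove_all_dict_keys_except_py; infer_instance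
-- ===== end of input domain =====

-- B replaces A's "collect keys-to-remove, then delete each" with "find the kept value, clear, reinsert"
-- (objective: simpler). Both Pythons mutate the dict in place; the equivalence proved here is about the return value.

-- ===== PORT A =====
-- to_remove = [k for k in d.keys() if k != key]; then 'del data[k]' for each (erase the first entry with that key)
def remove_all_dict_keys_except_py (d : List (String × String)) (key : String) : List (String × String) :=
  let to_remove : List String := d.foldl (fun acc kv => if kv.1 ≠ key then acc ++ [kv.1] else acc) []
  to_remove.foldl (fun data k => data.eraseP (fun kv => kv.1 == k)) d

-- ===== PORT B =====
-- kept = first value whose key == key (linear scan with break); clear; reinsert if found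
def remove_all_dict_keys_except_py_alt (d : List (String × String)) (key : String) : List (String × String) :=
  match d.find? (fun kv => kv.1 == key) with
  | some kv => [(key, kv.2)]
  | none => []

-- ===== PRECONDITION & SPEC =====
-- Pre_ excludes association lists with duplicate keys: they do not represent a Python dict (the argument of A), so
-- neither program's behaviour on them is specified.
def Pre_remove_all_dict_keys_except_py (d : List (String × String)) (key : String) : Prop :=
  (d.map Prod.fst).Nodup
instance (d : List (String × String)) (key : String) : Decidable (Pre_remove_all_dict_keys_except_py d key) := by unfold Pre_remove_all_dict_keys_except_py; infer_instance
def pvWitness_remove_all_dict_keys_except_py : (List (String × String)) × String := ([("a", "1"), ("b", "2")], "a")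
def Spec_remove_all_dict_keys_except_py (d : List (String × String)) (key : String) (out : List (String × String)) : Prop := out = remove_all_dict_keys_except_py_alt d key
instance (d : List (String × String)) (key : String) (out : List (String × String)) : Decidable (Spec_remove_all_dict_keys_except_py d key out) := by unfold Spec_remove_all_dict_keys_except_py; infer_instance

-- ===== CLAIM (what is proved, stated in full; the proofs are below) =====
def Claim_equal_remove_all_dict_keys_except_py : Prop := ∀ (d : List (String × String)) (key : String), Dom_remove_all_dict_keys_except_py d key → Pre_remove_all_dict_keys_except_py d key → Spec_remove_all_dict_keys_except_py d key (remove_all_dict_keys_except_py d key)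

-- ===== LEMMAS AND PROOFS =====

-- with nodup keys, erasing the first entry with key k is filtering out the (unique) entry with key k
theorem pvErase_eq_filter (d : List (String × String)) (h : (d.map Prod.fst).Nodup) (k : String) :
    d.eraseP (fun kv => kv.1 == k) = d.filter (fun kv => kv.1 != k) := by
  induction d with
  | nil => rfl
  | cons a t ih =>
    simp only [List.map_cons, List.nodup_cons] at h
    by_cases hk : a.1 = k
    · subst hk
      simp only [List.eraseP_cons, List.filter_cons, beq_self_eq_true, bne_self_eq_false,
        cond_true, Bool.false_eq_true, if_false]
      symm
      refine List.filter_eq_self.2 (fun kv hkv => ?_)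
      have : kv.1 ≠ a.1 := fun he => h.1 (he ▸ List.mem_map_of_mem hkv)
      simpa [bne] using this
    · simp only [List.eraseP_cons, List.filter_cons]
      have hb : (a.1 == k) = false := by simpa using hk
      simp [hb, bne, ih h.2]

theorem pvFold_erase_eq_filter (ks : List String) (d : List (String × String))
    (h : (d.map Prod.fst).Nodup) :
    ks.foldl (fun data k => data.eraseP (fun kv => kv.1 == k)) d
      = d.filter (fun kv => !ks.contains kv.1) := by
  induction ks generalizing d with
  | nil => simp
  | cons k ks ih =>
    simp only [List.foldl_cons]
    rw [pvErase_eq_filter d h k, ih]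
    · rw [List.filter_filter]
      refine List.filter_congr (fun kv _ => ?_)
      by_cases hk : kv.1 = k <;> simp [hk, bne]
    · exact ((List.filter_sublist (l := d)).map Prod.fst).nodup h

-- with nodup keys, keeping only the entries with key = key is B's "find the value, reinsert" result
theorem pvFilter_eq_find (d : List (String × String)) (key : String) (h : (d.map Prod.fst).Nodup) :
    d.filter (fun kv => kv.1 == key) = remove_all_dict_keys_except_py_alt d key := by
  unfold remove_all_dict_keys_except_py_alt
  induction d with
  | nil => rfl
  | cons a t ih =>
    obtain ⟨a1, a2⟩ := a
    simp only [List.map_cons, List.nodup_cons] at h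
    by_cases hk : a1 = key
    · subst hk
      have ht : t.filter (fun kv => kv.1 == a1) = [] := by
        refine List.filter_eq_nil_iff.2 (fun kv hkv => ?_)
        have : kv.1 ≠ a1 := fun he => h.1 (he ▸ List.mem_map_of_mem hkv)
        simpa using this
      simp [ht]
    · have hb : (a1 == key) = false := by simpa using hk
      simp only [List.filter_cons, List.find?_cons, hb, Bool.false_eq_true, if_false]
      exact ih h.2

-- ===== VERDICT (by name: the statement is the Claim_ definition above) =====
theorem remove_all_dict_keys_except_py_spec : Claim_equal_remove_all_dict_keys_except_py := by
  intro d key _ hpre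
  unfold Spec_remove_all_dict_keys_except_py remove_all_dict_keys_except_py
  have hto : d.foldl (fun acc kv => if kv.1 ≠ key then acc ++ [kv.1] else acc) ([] : List String)
      = (d.filter (fun kv => decide (kv.1 ≠ key))).map Prod.fst := by
    simpa using PySem.List.foldl_append_ite (l := d) (p := fun kv => kv.1 ≠ key) (f := Prod.fst) (acc := [])
  simp only [hto]
  rw [pvFold_erase_eq_filter _ _ hpre]
  have hf : d.filter (fun kv => !((d.filter (fun kv => decide (kv.1 ≠ key))).map Prod.fst).contains kv.1)
      = d.filter (fun kv => kv.1 == key) := by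
    refine List.filter_congr (fun kv hkv => ?_)
    by_cases hk : kv.1 = key
    · have hnm : kv.1 ∉ (d.filter (fun kv => decide (kv.1 ≠ key))).map Prod.fst := by
        intro hmem
        rcases List.mem_map.1 hmem with ⟨e, he, hfst⟩
        have hne := (List.mem_filter.1 he).2
        rw [hfst, hk] at hne
        simp at hne
      simp [decide_not] at hnm ⊢
      simp [hk]
    · have hm : kv.1 ∈ (d.filter (fun kv => decide (kv.1 ≠ key))).map Prod.fst :=
        List.mem_map_of_mem (List.mem_filter.2 ⟨hkv, by simpa using hk⟩)
      simp [decide_not] at hm ⊢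
      simp [hm]
  rw [hf]
  exact pvFilter_eq_find d key hpre
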